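-- pv_equiv track=rewrite | github.com/seeder-research/FastFourierSAT | Benchmark/Hamiltonian_Cycle/utils/encodecnf.py | de_xor
-- ===== SOURCE A (Python) =====
-- def de_xor(llist,start):
--     oldstart = start
--     exactFlag = 0
--     if len(llist)<=3:
--         return [list(llist),],start
--     else:
--         clist = []
--         i = 0
--         while True:
--             if i>=len(llist):
--                 break
--             elif i==len(llist)-1:
--                 exactFlag = 1
--                 break
--             else:
--                 clist.append([-llist[i],llist[i+1],start+1])
--                 start+=1
--                 i+=2
--     if exactFlag == 1:
--         flist,_ = de_xor([llist[-1]] + list(range(oldstart+1,start+1)),start)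
--     else:
--         flist,_ = de_xor(range(oldstart+1,start+1),start)
--     return clist+flist,_
-- ===== SOURCE B (Python) =====
-- def de_xor(llist, start):
--     clauses = []
--     cur = list(llist)
--     while len(cur) > 3:
--         k = len(cur) // 2
--         clauses += [[-cur[2 * j], cur[2 * j + 1], start + 1 + j] for j in range(k)]
--         nxt = list(range(start + 1, start + k + 1))
--         if len(cur) % 2 == 1:
--             nxt = [cur[-1]] + nxt
--         start += k
--         cur = nxt
--     clauses.append(list(cur))
--     return clauses, start
-- ===== Notes on version B (the rewrite author's own statement) =====
-- stated objective: simpler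
-- what changed: A's recursion over the shrinking list is replaced by an iterative worklist loop, and each level's clauses are produced by a closed-form comprehension that numbers the auxiliary variables start+1+j directly instead of incrementing a counter per pair.
import Mathlib
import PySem

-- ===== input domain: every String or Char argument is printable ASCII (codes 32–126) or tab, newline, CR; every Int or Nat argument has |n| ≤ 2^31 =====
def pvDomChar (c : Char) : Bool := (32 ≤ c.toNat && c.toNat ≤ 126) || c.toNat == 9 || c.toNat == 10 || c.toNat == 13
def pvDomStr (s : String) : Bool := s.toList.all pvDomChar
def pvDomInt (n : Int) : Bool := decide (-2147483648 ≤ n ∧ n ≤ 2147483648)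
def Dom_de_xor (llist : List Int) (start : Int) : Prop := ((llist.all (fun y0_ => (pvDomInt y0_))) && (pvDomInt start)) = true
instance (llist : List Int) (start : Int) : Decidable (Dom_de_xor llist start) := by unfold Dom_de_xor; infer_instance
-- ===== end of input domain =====

-- B replaces A's recursive pairing with an iterative worklist loop whose per-level clauses
-- are a closed-form comprehension (aux var start+1+j); objective: simpler decomposition, same cost.


-- ===== PORT A =====
-- A's inner 'while True' over i (state: clist accumulator, start, exactFlag),
-- transcribed as recursion consuming two elements per iteration.
def deXorPairsA : List Int → List (List Int) → Int → List (List Int) × Int × Bool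
  | [], clist, s => (clist, s, false)
  | [_], clist, s => (clist, s, true)
  | x :: y :: rest, clist, s => deXorPairsA rest (clist ++ [[-x, y, s + 1]]) (s + 1)

-- A's recursion with a fuel guard (length + 1 levels is always enough: the list shrinks each level).
def deXorA : Nat → List Int → Int → List (List Int) × Int
  | 0, llist, s => ([llist], s)
  | fuel + 1, llist, s =>
    if llist.length ≤ 3 then ([llist], s)
    else
      let r := deXorPairsA llist [] s
      let nxt := if r.2.2 then
          [llist.getLast!] ++ PySem.List.pyRange (s + 1) (r.2.1 + 1) 1
        else PySem.List.pyRange (s + 1) (r.2.1 + 1) 1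
      let f := deXorA fuel nxt r.2.1
      (r.1 ++ f.1, f.2)

def de_xor (llist : List Int) (start : Int) : List (List Int) × Int :=
  deXorA (llist.length + 1) llist start

-- ===== PORT B =====
-- B's 'while len(cur) > 3' worklist loop, fuel-guarded like A's recursion (same bound, same reason).
def deXorAltLoop : Nat → List (List Int) → List Int → Int → List (List Int) × Int
  | 0, acc, cur, s => (acc ++ [cur], s)
  | fuel + 1, acc, cur, s =>
    if 3 < cur.length then
      let k := cur.length / 2
      let cls := (List.range k).map
        (fun j => [-(cur.getD (2 * j) 0), cur.getD (2 * j + 1) 0, s + 1 + (j : Int)])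
      let nxt0 := PySem.List.pyRange (s + 1) (s + (k : Int) + 1) 1
      let nxt := if cur.length % 2 == 1 then [cur.getLast!] ++ nxt0 else nxt0
      deXorAltLoop fuel (acc ++ cls) nxt (s + (k : Int))
    else (acc ++ [cur], s)

def de_xor_alt (llist : List Int) (start : Int) : List (List Int) × Int :=
  deXorAltLoop (llist.length + 1) [] llist start

-- ===== PRECONDITION & SPEC =====
def Spec_de_xor (llist : List Int) (start : Int) (out : List (List Int) × Int) : Prop := out = de_xor_alt llist start
instance (llist : List Int) (start : Int) (out : List (List Int) × Int) : Decidable (Spec_de_xor llist start out) := by unfold Spec_de_xor; infer_instance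

-- ===== CLAIM (what is proved, stated in full; the proofs are below) =====
def Claim_equal_de_xor : Prop := ∀ (llist : List Int) (start : Int), Dom_de_xor llist start → Spec_de_xor llist start (de_xor llist start)

-- ===== LEMMAS AND PROOFS =====

-- A's pairing loop produces exactly B's per-level comprehension, the entry start plus the
-- number of pairs, and the odd-length flag.
theorem deXorPairsA_eq : ∀ (l : List Int) (cl : List (List Int)) (s : Int),
    deXorPairsA l cl s =
      (cl ++ (List.range (l.length / 2)).map
          (fun j => [-(l.getD (2 * j) 0), l.getD (2 * j + 1) 0, s + 1 + (j : Int)]),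
        s + ((l.length / 2 : Nat) : Int), l.length % 2 == 1)
  | [], cl, s => by simp [deXorPairsA]
  | [x], cl, s => by simp [deXorPairsA]
  | x :: y :: rest, cl, s => by
    have ih := deXorPairsA_eq rest (cl ++ [[-x, y, s + 1]]) (s + 1)
    have hlen : (x :: y :: rest).length / 2 = rest.length / 2 + 1 := by
      simp [List.length_cons]; omega
    have hmod : (x :: y :: rest).length % 2 = rest.length % 2 := by
      simp [List.length_cons]; omega
    simp only [deXorPairsA, ih, Prod.mk.injEq]
    refine ⟨?_, ?_, by rw [hmod]⟩
    · rw [hlen, List.range_succ_eq_map, List.map_cons, List.map_map]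
      simp only [List.append_assoc, List.cons_append, List.nil_append]
      congr 1
      congr 1
      · norm_num [List.getD]
      · apply List.map_congr_left
        intro j _
        simp only [Function.comp_apply]
        have h1 : 2 * (j + 1) = 2 * j + 1 + 1 := by ring
        rw [h1]
        simp only [List.getD_cons_succ, Nat.succ_eq_add_one]
        have h3 : s + 1 + 1 + (j : Int) = s + 1 + ((j : Int) + 1) := by ring
        push_cast
        rw [h3]
    · rw [hlen]; omega

-- The worklist loop with accumulator acc computes acc ++ (A's recursion), level for level.
theorem deXorAltLoop_eq : ∀ (fuel : Nat) (cur : List Int) (s : Int) (acc : List (List Int)),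
    deXorAltLoop fuel acc cur s = (acc ++ (deXorA fuel cur s).1, (deXorA fuel cur s).2)
  | 0, cur, s, acc => by simp [deXorAltLoop, deXorA]
  | fuel + 1, cur, s, acc => by
    by_cases h : 3 < cur.length
    · have hnle : ¬ cur.length ≤ 3 := by omega
      simp only [deXorAltLoop, deXorA, if_pos h, if_neg hnle]
      rw [deXorPairsA_eq]
      have hne : cur ≠ [] := by intro hc; subst hc; simp at h
      have ih := deXorAltLoop_eq fuel
        (if cur.length % 2 == 1 then
            [cur.getLast!] ++ PySem.List.pyRange (s + 1) (s + ((cur.length / 2 : Nat) : Int) + 1) 1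
          else PySem.List.pyRange (s + 1) (s + ((cur.length / 2 : Nat) : Int) + 1) 1)
        (s + ((cur.length / 2 : Nat) : Int))
        (acc ++ (List.range (cur.length / 2)).map
          (fun j => [-(cur.getD (2 * j) 0), cur.getD (2 * j + 1) 0, s + 1 + (j : Int)]))
      simp only [List.nil_append] at *
      rw [ih]
      simp [List.append_assoc]
    · have hle : cur.length ≤ 3 := by omega
      simp [deXorAltLoop, deXorA, if_neg h, if_pos hle]

-- ===== VERDICT (by name: the statement is the Claim_ definition above) =====
theorem de_xor_spec : Claim_equal_de_xor := by
  intro llist start _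
  unfold Spec_de_xor de_xor de_xor_alt
  rw [deXorAltLoop_eq]
  simp
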